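-- pv_equiv track=rewrite | github.com/Zramzek/Tubes_TBA_Parser | TUBES2.py | split_kalimat
-- ===== SOURCE A (Python) =====
-- keterangan = {'di rumah', 'di kampus', 'sendiri', 'kemarin', 'besok'}
--
-- def split_kalimat(kalimat):
--     kata = kalimat.split()
--     hasil = []
--     i = 0
--     while i < len(kata):
--         frasa = kata[i]
--         while i + 1 < len(kata) and frasa + " " + kata[i + 1] in keterangan:
--             frasa += " " + kata[i + 1]
--             i += 1
--         hasil.append(frasa)
--         i += 1
--     return hasil
-- ===== SOURCE B (Python) =====
-- keterangan = {'di rumah', 'di kampus', 'sendiri', 'kemarin', 'besok'}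
--
-- def split_kalimat(kalimat):
--     # Right-to-left scan with a pair lookbehind: since no keterangan phrase
--     # extends or overlaps another, every merge is a local decision on one
--     # adjacent pair, so the sentence can be consumed from the end, two words
--     # at a time when they form a known phrase, and the output reversed.
--     kata = kalimat.split()
--     hasil = []
--     i = len(kata) - 1
--     while i >= 0:
--         if i > 0 and kata[i - 1] + " " + kata[i] in keterangan:
--             hasil.append(kata[i - 1] + " " + kata[i])
--             i -= 2
--         else:
--             hasil.append(kata[i])
--             i -= 1
--     hasil.reverse()
--     return hasil
-- ===== Notes on version B (the rewrite author's own statement) =====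
-- stated objective: alternative
-- what changed: Replaces A's left-to-right greedy phrase extension (nested while loops growing a frasa buffer) by a right-to-left scan that decides each merge locally on one adjacent word pair and builds the output backwards, correct because no keterangan phrase extends or overlaps another.
import Mathlib
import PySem

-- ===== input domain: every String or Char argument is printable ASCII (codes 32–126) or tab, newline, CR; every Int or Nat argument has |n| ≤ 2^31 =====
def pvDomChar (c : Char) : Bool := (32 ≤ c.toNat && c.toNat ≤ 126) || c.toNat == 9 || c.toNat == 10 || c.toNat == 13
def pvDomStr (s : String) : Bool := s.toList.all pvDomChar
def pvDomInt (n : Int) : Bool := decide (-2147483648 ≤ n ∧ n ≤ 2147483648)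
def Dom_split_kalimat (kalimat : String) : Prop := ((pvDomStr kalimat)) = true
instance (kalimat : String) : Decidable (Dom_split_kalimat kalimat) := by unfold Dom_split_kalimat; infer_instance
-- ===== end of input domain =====

-- B replaces A's left-to-right greedy phrase extension (nested while loops growing a frasa
-- buffer) by a right-to-left scan deciding each merge locally on one adjacent word pair and
-- building the output backwards (correct because no keterangan phrase extends or overlaps
-- another); objective: alternative.

-- ===== PORT A =====
def ketA : PySem.Set String :=
  PySem.Set.ofList ["di rumah", "di kampus", "sendiri", "kemarin", "besok"]

-- inner while loop of A (fuel ≥ kata.length - i makes the loop total; it is exact there)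
def aInner (kata : List String) (fuel : Nat) (frasa : String) (i : Nat) : String × Nat :=
  match fuel with
  | 0 => (frasa, i)
  | Nat.succ fuel =>
    if i + 1 < kata.length ∧ PySem.Set.contains ketA (frasa ++ " " ++ kata[i+1]!) = true then
      aInner kata fuel (frasa ++ " " ++ kata[i+1]!) (i+1)
    else (frasa, i)

-- outer while loop of A (fuel ≥ kata.length - i makes the loop total; it is exact there)
def aOuter (kata : List String) (fuel : Nat) (hasil : List String) (i : Nat) : List String :=
  match fuel with
  | 0 => hasil
  | Nat.succ fuel =>
    if i < kata.length then
      aOuter kata fuel (hasil ++ [(aInner kata (kata.length - i) kata[i]! i).1])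
        ((aInner kata (kata.length - i) kata[i]! i).2 + 1)
    else hasil

def split_kalimat (kalimat : String) : List String :=
  aOuter (PySem.Str.split₀ kalimat) (PySem.Str.split₀ kalimat).length [] 0

-- ===== PORT B =====
def ketB : PySem.Set String :=
  PySem.Set.ofList ["di rumah", "di kampus", "sendiri", "kemarin", "besok"]

-- Source B's downward while loop (fuel ≥ number of iterations makes it total; the guards keep
-- every index in range, so pyGetD with default "" is exact there)
def bLoop (kata : List String) (fuel : Nat) (hasil : List String) (i : Int) : List String :=
  match fuel with
  | 0 => hasil
  | Nat.succ fuel =>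
    if 0 ≤ i then
      if 0 < i ∧ PySem.Set.contains ketB
          (PySem.List.pyGetD kata (i-1) "" ++ " " ++ PySem.List.pyGetD kata i "") = true then
        bLoop kata fuel
          (hasil ++ [PySem.List.pyGetD kata (i-1) "" ++ " " ++ PySem.List.pyGetD kata i ""]) (i-2)
      else
        bLoop kata fuel (hasil ++ [PySem.List.pyGetD kata i ""]) (i-1)
    else hasil

def split_kalimat_alt (kalimat : String) : List String :=
  (bLoop (PySem.Str.split₀ kalimat) (PySem.Str.split₀ kalimat).length []
    ((PySem.Str.split₀ kalimat).length - 1)).reverse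

-- ===== PRECONDITION & SPEC =====
def Spec_split_kalimat (kalimat : String) (out : List String) : Prop := out = split_kalimat_alt kalimat
instance (kalimat : String) (out : List String) : Decidable (Spec_split_kalimat kalimat out) := by unfold Spec_split_kalimat; infer_instance

-- ===== CLAIM (what is proved, stated in full; the proofs are below) =====
def Claim_equal_split_kalimat : Prop := ∀ (kalimat : String), Dom_split_kalimat kalimat → Spec_split_kalimat kalimat (split_kalimat kalimat)

-- ===== LEMMAS AND PROOFS =====

-- abbreviations used only in the proofs
def pair (a b : String) : Bool := PySem.Set.contains ketA (a ++ " " ++ b)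

def L : List String → List String
  | [] => []
  | [w] => [w]
  | w1 :: w2 :: rest =>
    if pair w1 w2 then (w1 ++ " " ++ w2) :: L rest else w1 :: L (w2 :: rest)

theorem contains_iff (s : String) :
    PySem.Set.contains ketA s = true ↔
      s = "di rumah" ∨ s = "di kampus" ∨ s = "sendiri" ∨ s = "kemarin" ∨ s = "besok" := by
  have h : ketA = ["di rumah", "di kampus", "sendiri", "kemarin", "besok"] := by decide
  rw [h]; simp [PySem.Set.contains]

theorem prefix_of_app (s y t : String) (h : s ++ " " ++ y = t) :
    s.toList ++ [' '] <+: t.toList := by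
  refine ⟨y.toList, ?_⟩
  have := congrArg String.toList h
  simpa [String.toList_append] using this

theorem noext (s y : String) (hs : PySem.Set.contains ketA s = true) :
    PySem.Set.contains ketA (s ++ " " ++ y) = false := by
  rw [contains_iff] at hs
  by_contra hc
  have hc' : PySem.Set.contains ketA (s ++ " " ++ y) = true := by
    cases h : PySem.Set.contains ketA (s ++ " " ++ y) with
    | true => rfl
    | false => exact absurd h hc
  rw [contains_iff] at hc'
  rcases hs with rfl|rfl|rfl|rfl|rfl <;>
    rcases hc' with h|h|h|h|h <;>
    · have := prefix_of_app _ _ _ h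
      revert this; decide

theorem toList_eq_iff (s t : String) : s.toList = t.toList ↔ s = t := by
  constructor
  · intro h; exact String.toList_injective h
  · intro h; rw [h]

theorem split_dr (l1 l2 : List Char) (h : l1 ++ ' ' :: l2 = "di rumah".toList) :
    l1 = ['d','i'] ∧ l2 = ['r','u','m','a','h'] := by
  have he : "di rumah".toList = ['d','i',' ','r','u','m','a','h'] := by decide
  rw [he] at h
  rcases l1 with _|⟨c0,_|⟨c1,_|⟨c2,_|⟨c3,_|⟨c4,_|⟨c5,_|⟨c6,_|⟨c7,l1⟩⟩⟩⟩⟩⟩⟩⟩ <;> simp_all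

theorem split_dk (l1 l2 : List Char) (h : l1 ++ ' ' :: l2 = "di kampus".toList) :
    l1 = ['d','i'] ∧ l2 = ['k','a','m','p','u','s'] := by
  have he : "di kampus".toList = ['d','i',' ','k','a','m','p','u','s'] := by decide
  rw [he] at h
  rcases l1 with _|⟨c0,_|⟨c1,_|⟨c2,_|⟨c3,_|⟨c4,_|⟨c5,_|⟨c6,_|⟨c7,_|⟨c8,l1⟩⟩⟩⟩⟩⟩⟩⟩⟩ <;> simp_all

theorem app_toList (a b : String) :
    (a ++ " " ++ b).toList = a.toList ++ ' ' :: b.toList := by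
  simp [String.toList_append]

theorem pair_left (a b : String) (h : pair a b = true) : a = "di" := by
  unfold pair at h
  rw [contains_iff] at h
  rcases h with h|h|h|h|h <;> have h' := congrArg String.toList h <;> rw [app_toList] at h'
  · rw [← toList_eq_iff]; exact (split_dr _ _ h').1
  · rw [← toList_eq_iff]; exact (split_dk _ _ h').1
  · rw [show "sendiri".toList = ['s','e','n','d','i','r','i'] from by decide] at h'
    have hm : (' ' : Char) ∈ (['s','e','n','d','i','r','i'] : List Char) := by rw [← h']; simp
    exact absurd hm (by decide)
  · rw [show "kemarin".toList = ['k','e','m','a','r','i','n'] from by decide] at h'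
    have hm : (' ' : Char) ∈ (['k','e','m','a','r','i','n'] : List Char) := by rw [← h']; simp
    exact absurd hm (by decide)
  · rw [show "besok".toList = ['b','e','s','o','k'] from by decide] at h'
    have hm : (' ' : Char) ∈ (['b','e','s','o','k'] : List Char) := by rw [← h']; simp
    exact absurd hm (by decide)

theorem no_overlap (x a b : String) (h1 : pair x a = true) (h2 : pair a b = true) : False := by
  have ha : a = "di" := pair_left a b h2
  subst ha
  unfold pair at h1
  rw [contains_iff] at h1
  rcases h1 with h|h|h|h|h <;> have h' := congrArg String.toList h <;> rw [app_toList] at h' <;>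
    rw [show String.toList "di" = ['d','i'] from by decide] at h'
  · have hs : ([' ','d','i'] : List Char) <:+ ['d','i',' ','r','u','m','a','h'] :=
      ⟨x.toList, by rw [show "di rumah".toList = ['d','i',' ','r','u','m','a','h'] from by decide] at h'; simpa using h'⟩
    revert hs; decide
  · have hs : ([' ','d','i'] : List Char) <:+ ['d','i',' ','k','a','m','p','u','s'] :=
      ⟨x.toList, by rw [show "di kampus".toList = ['d','i',' ','k','a','m','p','u','s'] from by decide] at h'; simpa using h'⟩
    revert hs; decide
  · have hs : ([' ','d','i'] : List Char) <:+ ['s','e','n','d','i','r','i'] :=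
      ⟨x.toList, by rw [show "sendiri".toList = ['s','e','n','d','i','r','i'] from by decide] at h'; simpa using h'⟩
    revert hs; decide
  · have hs : ([' ','d','i'] : List Char) <:+ ['k','e','m','a','r','i','n'] :=
      ⟨x.toList, by rw [show "kemarin".toList = ['k','e','m','a','r','i','n'] from by decide] at h'; simpa using h'⟩
    revert hs; decide
  · have hs : ([' ','d','i'] : List Char) <:+ ['b','e','s','o','k'] :=
      ⟨x.toList, by rw [show "besok".toList = ['b','e','s','o','k'] from by decide] at h'; simpa using h'⟩
    revert hs; decide

theorem Lsnoc1 (n : Nat) : ∀ (xs : List String) (x b : String), xs.length ≤ n →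
    pair x b = false → L (xs ++ [x, b]) = L (xs ++ [x]) ++ [b] := by
  induction n with
  | zero =>
    intro xs x b hlen hp
    have : xs = [] := by cases xs <;> simp_all
    subst this; simp [L, hp]
  | succ n ih =>
    intro xs x b hlen hp
    match xs with
    | [] => simp [L, hp]
    | [w] =>
      by_cases hwx : pair w x = true <;> simp [L, hwx, hp]
    | w1 :: w2 :: rest =>
      by_cases h12 : pair w1 w2 = true
      · simp only [List.cons_append, L, h12, if_pos]
        rw [ih rest x b (by simp at hlen; omega) hp]
      · simp only [List.cons_append, L, h12, Bool.false_eq_true, if_false]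
        rw [show w2 :: (rest ++ [x, b]) = (w2 :: rest) ++ [x, b] by simp]
        rw [ih (w2 :: rest) x b (by simp at hlen ⊢; omega) hp]
        simp

theorem Lsnoc2 (n : Nat) : ∀ (xs : List String) (a b : String), xs.length ≤ n →
    pair a b = true → L (xs ++ [a, b]) = L xs ++ [a ++ " " ++ b] := by
  induction n with
  | zero =>
    intro xs a b hlen hp
    have : xs = [] := by cases xs <;> simp_all
    subst this; simp [L, hp]
  | succ n ih =>
    intro xs a b hlen hp
    match xs with
    | [] => simp [L, hp]
    | [w] =>
      have hwa : pair w a = false := by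
        by_contra hc
        exact no_overlap w a b (by revert hc; cases pair w a <;> simp) hp
      simp [L, hwa, hp]
    | w1 :: w2 :: rest =>
      by_cases h12 : pair w1 w2 = true
      · simp only [List.cons_append, L, h12, if_pos]
        rw [ih rest a b (by simp at hlen; omega) hp]
      · simp only [List.cons_append, L, h12, Bool.false_eq_true, if_false]
        rw [show w2 :: (rest ++ [a, b]) = (w2 :: rest) ++ [a, b] by simp]
        rw [ih (w2 :: rest) a b (by simp at hlen ⊢; omega) hp]

theorem L_cons2_true (w1 w2 : String) (rest : List String) (h : pair w1 w2 = true) :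
    L (w1 :: w2 :: rest) = (w1 ++ " " ++ w2) :: L rest := by simp [L, h]

theorem L_cons2_false (w1 w2 : String) (rest : List String) (h : pair w1 w2 = false) :
    L (w1 :: w2 :: rest) = w1 :: L (w2 :: rest) := by simp [L, h]

theorem aInner_step (kata : List String) (fuel : Nat) (frasa : String) (i : Nat)
    (h : i + 1 < kata.length ∧ PySem.Set.contains ketA (frasa ++ " " ++ kata[i+1]!) = true) :
    aInner kata (fuel+1) frasa i = aInner kata fuel (frasa ++ " " ++ kata[i+1]!) (i+1) := by
  simp only [aInner]; rw [if_pos h]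

theorem aInner_stop (kata : List String) (fuel : Nat) (frasa : String) (i : Nat)
    (h : ¬ (i + 1 < kata.length ∧ PySem.Set.contains ketA (frasa ++ " " ++ kata[i+1]!) = true)) :
    aInner kata fuel frasa i = (frasa, i) := by
  cases fuel with
  | zero => rfl
  | succ fuel => simp only [aInner]; rw [if_neg h]

theorem aOuter_step (kata hasil : List String) (fuel i : Nat) (h : i < kata.length) :
    aOuter kata (fuel+1) hasil i
      = aOuter kata fuel (hasil ++ [(aInner kata (kata.length - i) kata[i]! i).1])
          ((aInner kata (kata.length - i) kata[i]! i).2 + 1) := by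
  simp only [aOuter]; rw [if_pos h]

theorem aOuter_stop (kata hasil : List String) (fuel i : Nat) (h : ¬ i < kata.length) :
    aOuter kata fuel hasil i = hasil := by
  cases fuel with
  | zero => rfl
  | succ fuel => simp only [aOuter]; rw [if_neg h]

theorem A_eq_L (n : Nat) : ∀ (kata : List String) (i : Nat) (hasil : List String) (f : Nat),
    kata.length - i ≤ n → kata.length - i ≤ f →
    aOuter kata f hasil i = hasil ++ L (kata.drop i) := by
  induction n with
  | zero =>
    intro kata i hasil f hn hf
    rw [aOuter_stop kata hasil f i (by omega)]
    rw [List.drop_eq_nil_of_le (by omega)]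
    simp [L]
  | succ n ih =>
    intro kata i hasil f hn hf
    by_cases hi : i < kata.length
    · obtain ⟨f', rfl⟩ : ∃ f', f = f' + 1 := ⟨f - 1, by omega⟩
      rw [aOuter_step kata hasil f' i hi]
      have e1 : kata[i]! = kata[i] := getElem!_pos kata i hi
      by_cases hc : i + 1 < kata.length ∧ PySem.Set.contains ketA (kata[i]! ++ " " ++ kata[i+1]!) = true
      · -- one merge, then the inner loop stops (noext)
        have hlt := hc.1
        have e2 : kata[i+1]! = kata[i+1] := getElem!_pos kata (i+1) hlt
        have hstep : aInner kata (kata.length - i) kata[i]! i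
            = (kata[i]! ++ " " ++ kata[i+1]!, i + 1) := by
          obtain ⟨g, hg⟩ : ∃ g, kata.length - i = g + 1 := ⟨kata.length - i - 1, by omega⟩
          rw [hg, aInner_step kata g kata[i]! i hc]
          exact aInner_stop kata g _ (i+1) (by
            intro hcc
            have := noext (kata[i]! ++ " " ++ kata[i+1]!) (kata[(i+1)+1]!) hc.2
            rw [hcc.2] at this; exact Bool.noConfusion this)
        rw [hstep]
        rw [ih kata (i+2) (hasil ++ [kata[i]! ++ " " ++ kata[i+1]!]) f' (by omega) (by omega)]
        have hp : pair kata[i] kata[i+1] = true := by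
          rw [← e1, ← e2]; exact hc.2
        rw [e1, e2]
        rw [List.drop_eq_getElem_cons hi, List.drop_eq_getElem_cons hlt,
          L_cons2_true _ _ _ hp]
        simp
      · -- the inner loop stops immediately
        rw [aInner_stop kata _ kata[i]! i hc]
        rw [ih kata (i+1) (hasil ++ [kata[i]!]) f' (by omega) (by omega)]
        rw [e1, List.drop_eq_getElem_cons hi]
        by_cases hlt : i + 1 < kata.length
        · have e2 : kata[i+1]! = kata[i+1] := getElem!_pos kata (i+1) hlt
          have hp : pair kata[i] kata[i+1] = false := by
            cases h : pair kata[i] kata[i+1] with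
            | true =>
              exact absurd ⟨hlt, by rw [e1, e2]; exact h⟩ hc
            | false => rfl
          rw [List.drop_eq_getElem_cons hlt, L_cons2_false _ _ _ hp,
            ← List.drop_eq_getElem_cons hlt]
          simp
        · rw [List.drop_eq_nil_of_le (show kata.length ≤ i + 1 by omega)]
          simp [L]
    · rw [aOuter_stop kata hasil f i hi]
      rw [List.drop_eq_nil_of_le (by omega)]
      simp [L]

theorem ketB_eq : ketB = ketA := rfl

theorem bLoop_neg (kata acc : List String) (f : Nat) (i : Int) (h : i < 0) :
    bLoop kata f acc i = acc := by
  cases f with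
  | zero => rfl
  | succ f => simp only [bLoop]; rw [if_neg (by omega)]

theorem pyGetD_idx (kata : List String) (k : Nat) (hk : k < kata.length) :
    PySem.List.pyGetD kata (k : Int) "" = kata[k] := by
  rw [PySem.List.pyGetD_natCast, List.getD_eq_getElem?_getD, List.getElem?_eq_getElem hk]
  rfl

theorem take_snoc (kata : List String) (m : Nat) (h : m < kata.length) :
    kata.take (m+1) = kata.take m ++ [kata[m]] := by
  rw [List.take_add_one, List.getElem?_eq_getElem h]
  rfl

theorem take_snoc2 (kata : List String) (m : Nat) (h : m + 1 < kata.length) :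
    kata.take (m+2) = kata.take m ++ [kata[m], kata[m+1]] := by
  have e : m + 2 = (m+1) + 1 := by omega
  rw [e, take_snoc kata (m+1) h, take_snoc kata m (by omega), List.append_assoc]
  rfl

theorem B_eq_L (n : Nat) : ∀ (j : Nat) (kata acc : List String) (f : Nat),
    j ≤ n → j ≤ kata.length → j ≤ f →
    bLoop kata f acc ((j : Int) - 1) = acc ++ (L (kata.take j)).reverse := by
  induction n with
  | zero =>
    intro j kata acc f hn hlen hf
    have : j = 0 := by omega
    subst this
    rw [bLoop_neg kata acc f _ (by omega)]
    simp [L]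
  | succ n ih =>
    intro j kata acc f hn hlen hf
    rcases Nat.eq_zero_or_pos j with rfl | hj
    · rw [bLoop_neg kata acc f _ (by omega)]
      simp [L]
    · obtain ⟨f', rfl⟩ : ∃ f', f = f' + 1 := ⟨f - 1, by omega⟩
      simp only [bLoop]
      rw [if_pos (show (0:Int) ≤ (j:Int) - 1 by omega)]
      have hj1lt : j - 1 < kata.length := by omega
      have e1 : PySem.List.pyGetD kata ((j:Int) - 1) "" = kata[j-1] := by
        rw [show ((j:Int) - 1) = ((j-1 : Nat) : Int) by omega]
        exact pyGetD_idx kata (j-1) hj1lt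
      by_cases h2 : 2 ≤ j
      · have hj2lt : j - 2 < kata.length := by omega
        have e2 : PySem.List.pyGetD kata ((j:Int) - 1 - 1) "" = kata[j-2] := by
          rw [show ((j:Int) - 1 - 1) = ((j-2 : Nat) : Int) by omega]
          exact pyGetD_idx kata (j-2) hj2lt
        have htake : kata.take j = kata.take (j-2) ++ [kata[j-2], kata[j-1]] := by
          have h' := take_snoc2 kata (j-2) (by omega)
          have e : j - 2 + 2 = j := by omega
          have e' : j - 2 + 1 = j - 1 := by omega
          simp only [e, e'] at h'
          exact h'
        by_cases hp : pair kata[j-2] kata[j-1] = true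
        · rw [if_pos (show (0:Int) < (j:Int) - 1 ∧ _ by
            refine ⟨by omega, ?_⟩
            rw [ketB_eq, e1, e2]; exact hp)]
          rw [e1, e2]
          rw [show ((j:Int) - 1 - 2) = ((j - 2 : Nat) : Int) - 1 by omega]
          rw [ih (j-2) kata _ f' (by omega) (by omega) (by omega)]
          rw [htake, Lsnoc2 (kata.take (j-2)).length _ _ _ le_rfl hp]
          simp
        · have hpf : pair kata[j-2] kata[j-1] = false := by
            cases h : pair kata[j-2] kata[j-1] with
            | true => exact absurd h hp
            | false => rfl
          rw [if_neg (show ¬ ((0:Int) < (j:Int) - 1 ∧ _) by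
            intro hcc
            have := hcc.2
            rw [ketB_eq, e1, e2] at this
            have hpt : pair kata[j-2] kata[j-1] = true := this
            rw [hpf] at hpt
            exact Bool.noConfusion hpt)]
          rw [e1]
          rw [show ((j:Int) - 1 - 1) = ((j - 1 : Nat) : Int) - 1 by omega]
          rw [ih (j-1) kata _ f' (by omega) (by omega) (by omega)]
          have htake1 : kata.take (j-1) = kata.take (j-2) ++ [kata[j-2]] := by
            rw [show j - 1 = (j-2) + 1 by omega, take_snoc kata (j-2) hj2lt]
          have hL : L (kata.take j) = L (kata.take (j-1)) ++ [kata[j-1]] := by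
            rw [htake, Lsnoc1 (kata.take (j-2)).length _ _ _ le_rfl hpf, ← htake1]
          rw [hL]
          simp
      · -- j = 1
        rw [if_neg (show ¬ ((0:Int) < (j:Int) - 1 ∧ _) by intro hcc; have := hcc.1; omega)]
        rw [e1]
        rw [show ((j:Int) - 1 - 1) = ((j - 1 : Nat) : Int) - 1 by omega]
        rw [ih (j-1) kata _ f' (by omega) (by omega) (by omega)]
        have htake : kata.take j = kata.take (j-1) ++ [kata[j-1]] := by
          have h' := take_snoc kata (j-1) hj1lt
          have e : j - 1 + 1 = j := by omega
          simp only [e] at h'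
          exact h'
        rw [htake]
        simp only [show j - 1 = 0 by omega]
        simp [L]

-- ===== VERDICT (by name: the statement is the Claim_ definition above) =====
theorem split_kalimat_spec : Claim_equal_split_kalimat := by
  intro kalimat _
  unfold Spec_split_kalimat split_kalimat split_kalimat_alt
  set kata := PySem.Str.split₀ kalimat with hkata
  clear_value kata
  rw [A_eq_L kata.length kata 0 [] kata.length (by omega) (by omega)]
  rw [B_eq_L kata.length kata.length kata [] kata.length le_rfl le_rfl le_rfl]
  simp
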